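-- pv_equiv track=rewrite | github.com/anhminhbo/IntroToProgramming | Week10/alice_words.py | is_hyphen_between
-- ===== SOURCE A (Python) =====
-- def is_alphabet(char):
--     return ord(char) in range (ord("a"),ord("z")+1)
--
-- def is_hyphen_between(word):
--     for index in range(len(word)):
--         try:
--             if word[index] == "-" and index - 1 < 0:
--                 return False
--             if word[index] == "-" and is_alphabet(word[index+1]) and is_alphabet(word[index-1]):
--                 return True
--         except IndexError:
--             return False
--     return False
-- ===== SOURCE B (Python) =====
-- def is_hyphen_between(word):
--     parts = word.split('-')
--     return any(left != "" and right != "" and "a" <= left[-1] <= "z" and "a" <= right[0] <= "z"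
--                for left, right in zip(parts, parts[1:]))
-- ===== Notes on version B (the rewrite author's own statement) =====
-- stated objective: faster
-- what changed: Instead of A's interpreted index-walk with try/except IndexError, B splits the word into hyphen-separated segments (one C-level str.split) and checks whether some adjacent pair of segments has a lowercase letter at the split boundary (left segment ends with a letter, right one starts with one).
-- intended difference: On words with a leading hyphen that still contain a letter-hyphen-letter triple later (e.g. "-a-b"), A returns False because its index-0 guard aborts the scan, while B returns True, which is intended since such a word really does contain a hyphen between two letters. — e.g. on is_hyphen_between("-a-b"): A returns false, B returns true
import Mathlib
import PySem

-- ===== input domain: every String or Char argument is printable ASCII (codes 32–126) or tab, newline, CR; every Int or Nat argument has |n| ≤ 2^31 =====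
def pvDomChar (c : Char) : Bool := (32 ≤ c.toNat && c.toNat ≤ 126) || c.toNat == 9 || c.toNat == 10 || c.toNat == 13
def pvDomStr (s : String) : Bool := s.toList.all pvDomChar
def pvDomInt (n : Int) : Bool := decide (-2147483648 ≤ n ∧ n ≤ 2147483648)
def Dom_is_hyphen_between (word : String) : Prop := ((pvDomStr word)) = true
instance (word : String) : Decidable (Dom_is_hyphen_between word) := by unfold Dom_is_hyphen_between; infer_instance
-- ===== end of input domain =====

-- B replaces A's index-walk with try/except by splitting the word on '-' and checking
-- a letter boundary between adjacent segments; intended difference on words starting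
-- with '-' (see D_ below).


-- ===== PORT A =====
-- is_alphabet: ord(char) in range(ord("a"), ord("z")+1)
def pvIsAlphabet (c : Char) : Bool := 97 ≤ c.toNat && c.toNat ≤ 122

-- the 'for index in range(len(word))' loop, with the try/except IndexError:
-- word[index+1] out of range returns False (the except branch)
-- fuel = number of indices of range(len(word)) still to visit (= len - index)
def pvLoopA (cs : List Char) (index : Nat) : Nat → Bool
  | 0 => false
  | fuel + 1 =>
    if h : index < cs.length then
      if cs[index] = '-' && decide ((index : Int) - 1 < 0) then false
      else if cs[index] = '-' then
        match cs[index + 1]? with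
        | none => false  -- IndexError on word[index+1] → except: return False
        | some nxt =>
          if pvIsAlphabet nxt && pvIsAlphabet (cs.getD (index - 1) ' ') then true
          else pvLoopA cs (index + 1) fuel
      else pvLoopA cs (index + 1) fuel
    else false

def is_hyphen_between (word : String) : Bool :=
  pvLoopA word.toList 0 word.toList.length

-- ===== PORT B =====
def pvLower (c : Char) : Bool := 'a' ≤ c && c ≤ 'z'

-- word.split('-')  (hand-written split on a single character, exact for str.split with
-- an explicit one-character separator: empty segments are kept, '' splits to [''])
def pvSplit : List Char → List (List Char)
  | [] => [[]]
  | c :: rest =>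
    if c = '-' then [] :: pvSplit rest
    else
      match pvSplit rest with
      | [] => [[c]]  -- unreachable: pvSplit never returns []
      | p :: ps => (c :: p) :: ps

-- left != "" and right != "" and "a" <= left[-1] <= "z" and "a" <= right[0] <= "z"
def pvGoodPair (t : List Char × List Char) : Bool :=
  !t.1.isEmpty && !t.2.isEmpty && pvLower (t.1.getLastD ' ') && pvLower (t.2.headD ' ')

def is_hyphen_between_alt (word : String) : Bool :=
  let parts := pvSplit word.toList
  (parts.zip (parts.drop 1)).any pvGoodPair

-- ===== PRECONDITION & SPEC =====
-- On words with a leading hyphen that still contain a letter-hyphen-letter triple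
-- later (e.g. "-a-b"), A returns False because its index-0 guard aborts the scan,
-- while B returns True, which is intended since such a word really does contain a
-- hyphen between two letters.
def D_is_hyphen_between (word : String) : Prop :=
  word.toList.head? = some '-' ∧
  ∃ i < word.toList.length,
    word.toList.getD (i + 1) ' ' = '-' ∧
    'a' ≤ word.toList.getD i ' ' ∧ word.toList.getD i ' ' ≤ 'z' ∧
    'a' ≤ word.toList.getD (i + 2) ' ' ∧ word.toList.getD (i + 2) ' ' ≤ 'z'
instance (word : String) : Decidable (D_is_hyphen_between word) := by
  unfold D_is_hyphen_between; infer_instance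

def Spec_is_hyphen_between (word : String) (out : Bool) : Prop :=
  ¬ D_is_hyphen_between word → out = is_hyphen_between_alt word
instance (word : String) (out : Bool) : Decidable (Spec_is_hyphen_between word out) := by
  unfold Spec_is_hyphen_between; infer_instance

def pvDiffWitness_is_hyphen_between : String := "-a-b"
def pvDiffWitnessOut_is_hyphen_between : Bool × Bool := (false, true)

-- ===== CLAIM (what is proved, stated in full; the proofs are below) =====
def Claim_unchanged_is_hyphen_between : Prop := ∀ (word : String), Dom_is_hyphen_between word → Spec_is_hyphen_between word (is_hyphen_between word)
def Claim_changed_is_hyphen_between : Prop := Dom_is_hyphen_between (pvDiffWitness_is_hyphen_between) ∧ D_is_hyphen_between (pvDiffWitness_is_hyphen_between) ∧ is_hyphen_between (pvDiffWitness_is_hyphen_between) = pvDiffWitnessOut_is_hyphen_between.1 ∧ is_hyphen_between_alt (pvDiffWitness_is_hyphen_between) = pvDiffWitnessOut_is_hyphen_between.2 ∧ pvDiffWitnessOut_is_hyphen_between.1 ≠ pvDiffWitnessOut_is_hyphen_between.2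
def Claim_exact_is_hyphen_between : Prop := ∀ (word : String), Dom_is_hyphen_between word → D_is_hyphen_between word → is_hyphen_between word ≠ is_hyphen_between_alt word

-- ===== LEMMAS AND PROOFS =====

-- shared witness shape: a letter-hyphen-letter triple whose hyphen is at index j ≥ 1
def pvTrip (cs : List Char) (j : Nat) : Prop :=
  1 ≤ j ∧ j + 1 < cs.length ∧ cs.getD j ' ' = '-' ∧
  pvIsAlphabet (cs.getD (j + 1) ' ') = true ∧ pvIsAlphabet (cs.getD (j - 1) ' ') = true

-- decomposition form of the same witness
def pvHasTrip (cs : List Char) : Prop :=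
  ∃ xs a b ys, cs = xs ++ a :: '-' :: b :: ys ∧ pvLower a = true ∧ pvLower b = true

theorem pvLower_eq (c : Char) : pvLower c = pvIsAlphabet c := by
  simp only [pvLower, pvIsAlphabet, Char.le_def]
  rcases c with ⟨v, hv⟩
  simp [Char.toNat, UInt32.le_iff_toNat_le]
  rfl

theorem pvAlpha_iff (c : Char) : pvIsAlphabet c = true ↔ ('a' ≤ c ∧ c ≤ 'z') := by
  rw [← pvLower_eq]; simp [pvLower]

theorem pvSplit_ne_nil (cs : List Char) : ∃ p ps, pvSplit cs = p :: ps := by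
  cases cs with
  | nil => exact ⟨[], [], rfl⟩
  | cons c rest =>
    by_cases hc : c = '-'
    · exact ⟨[], pvSplit rest, by simp [pvSplit, hc]⟩
    · obtain ⟨p, ps, hp⟩ := pvSplit_ne_nil rest
      exact ⟨c :: p, ps, by simp [pvSplit, hc, hp]⟩

-- head segment of the split: empty iff the word is empty or starts with '-';
-- otherwise it starts with the word's first character
theorem pvSplit_head (cs : List Char) (q : List Char) (qs : List (List Char))
    (h : pvSplit cs = q :: qs) :
    (q ≠ [] ↔ ∃ b ys, cs = b :: ys ∧ b ≠ '-') ∧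
    (∀ b ys, cs = b :: ys → b ≠ '-' → q.head? = some b) := by
  cases cs with
  | nil =>
    simp [pvSplit] at h
    constructor
    · simp [h.1]
    · intro b ys hby; cases hby
  | cons c rest =>
    by_cases hc : c = '-'
    · simp [pvSplit, hc] at h
      constructor
      · constructor
        · intro hq; exact absurd h.1 hq
        · rintro ⟨b, ys, hby, hb⟩
          cases hby; exact absurd hc hb
      · intro b ys hby hb; cases hby; exact absurd hc hb
    · obtain ⟨p, ps, hp⟩ := pvSplit_ne_nil rest
      simp [pvSplit, hc, hp] at h
      constructor
      · constructor
        · intro _; exact ⟨c, rest, rfl, hc⟩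
        · intro _; rw [← h.1]; simp
      · intro b ys hby _; cases hby; rw [← h.1]; simp

-- a single segment means there is no hyphen at all
theorem pvSplit_singleton (cs : List Char) (p : List Char)
    (h : pvSplit cs = [p]) : '-' ∉ cs := by
  cases cs with
  | nil => simp
  | cons c rest =>
    by_cases hc : c = '-'
    · obtain ⟨p', ps', hp'⟩ := pvSplit_ne_nil rest
      simp [pvSplit, hc, hp'] at h
    · obtain ⟨p', ps', hp'⟩ := pvSplit_ne_nil rest
      simp [pvSplit, hc, hp'] at h
      have := pvSplit_singleton rest p' (by rw [hp', h.2])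
      simp [this, Ne.symm hc]

theorem hasTrip_nil : ¬ pvHasTrip [] := by
  rintro ⟨xs, a, b, ys, h, -, -⟩
  cases xs <;> simp at h

theorem hasTrip_mem (cs : List Char) (h : pvHasTrip cs) : '-' ∈ cs := by
  obtain ⟨xs, a, b, ys, rfl, -, -⟩ := h
  simp

-- prepending a non-matching head preserves/reflects the witness
theorem hasTrip_cons_hyphen (rest : List Char) :
    pvHasTrip ('-' :: rest) ↔ pvHasTrip rest := by
  constructor
  · rintro ⟨xs, a, b, ys, h, ha, hb⟩
    cases xs with
    | nil =>
      simp at h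
      rw [← h.1] at ha; exact absurd ha (by decide)
    | cons x xs' =>
      simp at h
      exact ⟨xs', a, b, ys, h.2, ha, hb⟩
  · rintro ⟨xs, a, b, ys, rfl, ha, hb⟩
    exact ⟨'-' :: xs, a, b, ys, rfl, ha, hb⟩

theorem hasTrip_cons_of_head_ne (c : Char) (rest : List Char)
    (hne : rest.head? ≠ some '-') :
    pvHasTrip (c :: rest) ↔ pvHasTrip rest := by
  constructor
  · rintro ⟨xs, a, b, ys, h, ha, hb⟩
    cases xs with
    | nil =>
      simp at h
      rw [h.2] at hne; simp at hne
    | cons x xs' =>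
      simp at h
      exact ⟨xs', a, b, ys, h.2, ha, hb⟩
  · rintro ⟨xs, a, b, ys, rfl, ha, hb⟩
    exact ⟨c :: xs, a, b, ys, rfl, ha, hb⟩

-- main characterisation of B: the split-based any() finds exactly a decomposition witness
theorem split_any_iff (cs : List Char) :
    (((pvSplit cs).zip ((pvSplit cs).drop 1)).any pvGoodPair = true) ↔ pvHasTrip cs := by
  cases cs with
  | nil =>
    simp [pvSplit]
    exact hasTrip_nil
  | cons c rest =>
    by_cases hc : c = '-'
    · -- head hyphen: first pair has empty left segment, rest behaves like rest
      obtain ⟨p, ps, hp⟩ := pvSplit_ne_nil rest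
      subst hc
      rw [show pvSplit ('-' :: rest) = [] :: pvSplit rest from by simp [pvSplit]]
      rw [hp]
      simp only [List.zip_cons_cons, List.drop_succ_cons, List.drop_zero, List.any_cons]
      rw [show pvGoodPair ([], p) = false from by simp [pvGoodPair]]
      rw [Bool.false_or]
      rw [show ((p :: ps).zip ps).any pvGoodPair =
            (((pvSplit rest).zip ((pvSplit rest).drop 1)).any pvGoodPair) from by rw [hp]; rfl]
      rw [split_any_iff rest, hasTrip_cons_hyphen]
    · obtain ⟨p, ps, hp⟩ := pvSplit_ne_nil rest
      have hcs : pvSplit (c :: rest) = (c :: p) :: ps := by simp [pvSplit, hc, hp]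
      cases ps with
      | nil =>
        -- only one segment: no hyphen anywhere, both sides false
        rw [hcs]
        simp only [List.drop_succ_cons, List.drop_zero, List.zip_nil_right, List.any_nil,
          Bool.false_eq_true, false_iff]
        intro ht
        have := hasTrip_mem _ ht
        rcases List.mem_cons.mp this with h1 | h1
        · exact hc h1.symm
        · exact pvSplit_singleton rest p hp h1
      | cons q qs =>
        have hrest := split_any_iff rest
        rw [hp] at hrest
        simp only [List.zip_cons_cons, List.drop_succ_cons, List.drop_zero, List.any_cons,
          Bool.or_eq_true] at hrest
        rw [hcs]
        simp only [List.zip_cons_cons, List.drop_succ_cons, List.drop_zero, List.any_cons,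
          Bool.or_eq_true]
        cases p with
        | cons d p' =>
          -- rest starts with d ≠ '-': boundary pair unchanged, witness unchanged
          have hd : rest.head? = some d ∧ d ≠ '-' := by
            cases rest with
            | nil => simp [pvSplit] at hp
            | cons e r' =>
              by_cases he : e = '-'
              · simp [pvSplit, he] at hp
              · obtain ⟨p2, ps2, hp2⟩ := pvSplit_ne_nil r'
                simp [pvSplit, he, hp2] at hp
                refine ⟨by rw [hp.1.1] at he ⊢; simp, by rw [hp.1.1] at he; exact he⟩
          rw [show pvGoodPair (c :: d :: p', q) = pvGoodPair (d :: p', q) from by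
            simp [pvGoodPair]]
          rw [hasTrip_cons_of_head_ne c rest (by rw [hd.1]; simp [hd.2])]
          rw [← hrest]
        | nil =>
          -- rest starts with '-': the boundary pair is exactly "c is a letter and the
          -- next segment starts with a letter"
          obtain ⟨rest', hrest'⟩ : ∃ r', rest = '-' :: r' := by
            cases rest with
            | nil => simp [pvSplit] at hp
            | cons e r' =>
              by_cases he : e = '-'
              · exact ⟨r', by rw [he]⟩
              · obtain ⟨p2, ps2, hp2⟩ := pvSplit_ne_nil r'
                simp [pvSplit, he, hp2] at hp
          subst hrest'
          have hq : pvSplit rest' = q :: qs := by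
            simpa [pvSplit] using hp
          have hQ := pvSplit_head rest' q qs hq
          constructor
          · rintro (hgood | htail)
            · -- the boundary pair fires: witness with xs = []
              simp only [pvGoodPair, Bool.and_eq_true, Bool.not_eq_eq_eq_not, Bool.not_true,
                List.isEmpty_eq_false_iff] at hgood
              obtain ⟨⟨⟨-, hqne⟩, hcL⟩, hqL⟩ := hgood
              obtain ⟨b, ys, hby, -⟩ := hQ.1.mp hqne
              refine ⟨[], c, b, ys, by rw [hby]; rfl, by simpa using hcL, ?_⟩
              have := hQ.2 b ys hby (by
                intro hb; rw [hb] at hby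
                rw [hby] at hq
                obtain ⟨p2, ps2, hp2⟩ := pvSplit_ne_nil ys
                simp [pvSplit, hp2] at hq
                rw [← hq.1] at hqne; simp at hqne)
              have hhd : q.headD ' ' = b := by
                cases q with
                | nil => simp at hqne
                | cons z zs => simp at this ⊢; exact this
              rw [← hhd]; exact hqL
            · -- a witness further right
              have : pvHasTrip ('-' :: rest') := by
                rw [hasTrip_cons_hyphen]
                rw [← split_any_iff rest', hq]
                cases qs with
                | nil => simp at htail
                | cons q2 qs2 => simpa using htail
              obtain ⟨xs, a, b, ys, h2, ha, hb⟩ := this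
              exact ⟨c :: xs, a, b, ys, by rw [h2]; rfl, ha, hb⟩
          · rintro ⟨xs, a, b, ys, h2, ha, hb⟩
            cases xs with
            | nil =>
              -- witness at the boundary: boundary pair fires
              rw [List.nil_append] at h2
              injection h2 with hca h2'
              injection h2' with hdash hr
              subst hca
              left
              have hbne : (b : Char) ≠ '-' := by
                intro hbb; rw [hbb] at hb; exact absurd hb (by decide)
              have hqh := hQ.2 b ys hr hbne
              have hqne : q ≠ [] := hQ.1.mpr ⟨b, ys, hr, hbne⟩
              simp only [pvGoodPair, Bool.and_eq_true, Bool.not_eq_eq_eq_not, Bool.not_true,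
                List.isEmpty_eq_false_iff]
              refine ⟨⟨⟨by simp, hqne⟩, by simpa using ha⟩, ?_⟩
              cases q with
              | nil => exact absurd rfl hqne
              | cons z zs => simp only [List.headD_cons]; simp only [List.head?_cons, Option.some.injEq] at hqh; rw [hqh]; exact hb
            | cons x xs' =>
              -- witness further right: tail any fires
              simp at h2
              right
              have : pvHasTrip rest' := by
                rw [← hasTrip_cons_hyphen]
                exact ⟨xs', a, b, ys, h2.2, ha, hb⟩
              rw [← split_any_iff rest', hq] at this
              cases qs with
              | nil => simp at this
              | cons q2 qs2 => simpa using this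

-- decomposition witness ↔ index witness
theorem hasTrip_iff_trip (cs : List Char) : pvHasTrip cs ↔ ∃ j, pvTrip cs j := by
  constructor
  · rintro ⟨xs, a, b, ys, rfl, ha, hb⟩
    induction xs with
    | nil =>
      refine ⟨1, le_refl 1, by simp only [List.nil_append, List.length_cons]; omega, rfl, ?_, ?_⟩
      · show pvIsAlphabet ((a :: '-' :: b :: ys).getD 2 ' ') = true
        simpa [pvLower_eq] using hb
      · show pvIsAlphabet ((a :: '-' :: b :: ys).getD 0 ' ') = true
        simpa [pvLower_eq] using ha
    | cons x xs' ih =>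
      obtain ⟨j, hj1, hj2, hm, hn, hp⟩ := ih
      refine ⟨j + 1, by omega, by simp only [List.cons_append, List.length_cons] at hj2 ⊢; omega, ?_, ?_, ?_⟩
      · simpa using hm
      · simpa using hn
      · show pvIsAlphabet ((x :: (xs' ++ a :: '-' :: b :: ys)).getD (j + 1 - 1) ' ') = true
        rw [show j + 1 - 1 = (j - 1) + 1 from by omega]
        simpa using hp
  · rintro ⟨j, hj1, hj2, hm, hn, hp⟩
    induction cs generalizing j with
    | nil => simp at hj2
    | cons x cs' ih =>
      rcases Nat.lt_or_ge j 2 with hj | hj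
      · -- j = 1: the triple sits right at the front
        have hj' : j = 1 := by omega
        subst hj'
        cases cs' with
        | nil => simp only [List.length_cons, List.length_nil] at hj2; omega
        | cons u v =>
          cases v with
          | nil => simp only [List.length_cons, List.length_nil] at hj2; omega
          | cons w t =>
            refine ⟨[], x, w, t, ?_, ?_, ?_⟩
            · have hu : u = '-' := by simpa using hm
              rw [hu]; rfl
            · rw [pvLower_eq]; simpa using hp
            · rw [pvLower_eq]; simpa using hn
      · -- j ≥ 2: recurse into the tail
        have : pvHasTrip cs' := by
          apply ih (j - 1)
          · omega
          · simp at hj2; omega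
          · rw [show j = (j - 1) + 1 from by omega] at hm; simpa using hm
          · rw [show j + 1 = ((j - 1) + 1) + 1 from by omega] at hn; simpa using hn
          · rw [show j - 1 = ((j - 1 - 1)) + 1 from by omega] at hp
            rw [show j - 1 - 1 = (j - 1) - 1 from by omega] at hp
            simpa using hp
        obtain ⟨xs, a, b, ys, rfl, ha, hb⟩ := this
        exact ⟨x :: xs, a, b, ys, rfl, ha, hb⟩

theorem alt_iff (word : String) :
    is_hyphen_between_alt word = true ↔ ∃ j, pvTrip word.toList j := by
  unfold is_hyphen_between_alt
  rw [split_any_iff, hasTrip_iff_trip]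

theorem loopA_iff (fuel : ℕ) (cs : List Char) (k : ℕ)
    (hf : cs.length - k = fuel) (hk : 1 ≤ k) :
    pvLoopA cs k fuel = true ↔ ∃ j, k ≤ j ∧ pvTrip cs j := by
  induction fuel generalizing k with
  | zero =>
    rw [pvLoopA]
    constructor
    · intro h; cases h
    · rintro ⟨j, hkj, _, hj2, _⟩; omega
  | succ n ih =>
    rw [pvLoopA]
    have hko : k < cs.length := by omega
    rw [dif_pos hko]
    have hneg : ((k : Int) - 1 < 0) = False := by simp; omega
    rw [if_neg (by simp [hneg])]
    by_cases hc : cs[k] = '-'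
    · rw [if_pos hc]
      rcases Nat.lt_or_ge (k + 1) cs.length with hlt | hge
      · rw [List.getElem?_eq_getElem hlt]
        show (if pvIsAlphabet cs[k+1] && pvIsAlphabet (cs.getD (k - 1) ' ') then true
              else pvLoopA cs (k + 1) n) = true ↔ _
        by_cases hgood : (pvIsAlphabet cs[k + 1] && pvIsAlphabet (cs.getD (k - 1) ' ')) = true
        · rw [if_pos hgood]
          simp only [Bool.and_eq_true] at hgood
          constructor
          · intro _
            exact ⟨k, le_refl _, hk, hlt, by rw [List.getD_eq_getElem (hn := hko)]; exact hc,
              by rw [List.getD_eq_getElem (hn := hlt)]; exact hgood.1, hgood.2⟩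
          · intro _; rfl
        · rw [if_neg hgood]
          rw [ih (k + 1) (by omega) (by omega)]
          constructor
          · rintro ⟨j, hkj, ht⟩; exact ⟨j, by omega, ht⟩
          · rintro ⟨j, hkj, ht⟩
            rcases Nat.eq_or_lt_of_le hkj with rfl | hlt2
            · exfalso
              apply hgood
              obtain ⟨_, _, _, h4, h5⟩ := ht
              rw [List.getD_eq_getElem (hn := hlt)] at h4
              rw [Bool.and_eq_true]; exact ⟨h4, h5⟩
            · exact ⟨j, by omega, ht⟩
      · rw [List.getElem?_eq_none (by omega)]
        constructor
        · intro h; cases h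
        · rintro ⟨j, hkj, _, hj2, _⟩; omega
    · rw [if_neg hc]
      rw [ih (k + 1) (by omega) (by omega)]
      constructor
      · rintro ⟨j, hkj, ht⟩; exact ⟨j, by omega, ht⟩
      · rintro ⟨j, hkj, ht⟩
        rcases Nat.eq_or_lt_of_le hkj with rfl | hlt2
        · exact absurd (by have := ht.2.2.1; rw [List.getD_eq_getElem (hn := hko)] at this; exact this) hc
        · exact ⟨j, by omega, ht⟩

-- D's existential (over the left letter's index) matches pvTrip (over the hyphen's index)
theorem D_trip_iff (word : String) :
    (∃ i < word.toList.length,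
        word.toList.getD (i + 1) ' ' = '-' ∧
        'a' ≤ word.toList.getD i ' ' ∧ word.toList.getD i ' ' ≤ 'z' ∧
        'a' ≤ word.toList.getD (i + 2) ' ' ∧ word.toList.getD (i + 2) ' ' ≤ 'z')
      ↔ ∃ j, pvTrip word.toList j := by
  set cs := word.toList
  constructor
  · rintro ⟨i, hi, hm, hl1, hl2, hr1, hr2⟩
    have hr : i + 2 < cs.length := by
      by_contra hge
      rw [List.getD_eq_default _ _ (by omega)] at hr1
      exact absurd hr1 (by decide)
    refine ⟨i + 1, by omega, by omega, hm, ?_, ?_⟩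
    · show pvIsAlphabet (cs.getD (i + 1 + 1) ' ') = true
      exact (pvAlpha_iff _).mpr ⟨hr1, hr2⟩
    · show pvIsAlphabet (cs.getD (i + 1 - 1) ' ') = true
      simp only [Nat.add_sub_cancel]
      exact (pvAlpha_iff _).mpr ⟨hl1, hl2⟩
  · rintro ⟨j, hj1, hj2, hm, hn, hp⟩
    obtain ⟨hn1, hn2⟩ := (pvAlpha_iff _).mp hn
    obtain ⟨hp1, hp2⟩ := (pvAlpha_iff _).mp hp
    have e1 : j - 1 + 1 = j := by omega
    have e2 : j - 1 + 2 = j + 1 := by omega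
    exact ⟨j - 1, by omega, by rw [e1]; exact hm, hp1, hp2, by rw [e2]; exact hn1,
      by rw [e2]; exact hn2⟩

theorem A_false_of_head_hyphen (word : String) (h : word.toList.head? = some '-') :
    is_hyphen_between word = false := by
  unfold is_hyphen_between
  rcases hcs : word.toList with _ | ⟨c, rest⟩
  · rfl
  · rw [hcs] at h
    simp only [List.head?_cons, Option.some.injEq] at h
    subst h
    show pvLoopA ('-' :: rest) 0 (rest.length + 1) = false
    rw [pvLoopA]
    simp

-- ===== VERDICT (by name: the statement is the Claim_ definition above) =====
theorem is_hyphen_between_spec : Claim_unchanged_is_hyphen_between := by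
  intro word _ hnD
  unfold D_is_hyphen_between at hnD
  rcases hh : word.toList.head? with _ | c
  · -- empty word: both false
    have he : word.toList = [] := by
      cases head : word.toList with
      | nil => rfl
      | cons a l => rw [head] at hh; simp at hh
    unfold is_hyphen_between is_hyphen_between_alt
    rw [he]
    rfl
  · by_cases hc : c = '-'
    · subst hc
      -- A is false; B is false too, since ¬D forbids any triple
      rw [A_false_of_head_hyphen word hh]
      rcases hb : is_hyphen_between_alt word with _ | _
      · rfl
      · exact absurd ⟨hh, (D_trip_iff word).mpr ((alt_iff word).mp hb)⟩ hnD
    · -- first char is not '-': A's step 0 recurses to index 1, then both scan alike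
      have h0 : 0 < word.toList.length := by
        cases hhead : word.toList with
        | nil => rw [hhead] at hh; simp at hh
        | cons a l => simp
      have hc0 : word.toList[0]'h0 = c := by
        have h := hh
        rw [List.head?_eq_getElem?, List.getElem?_eq_getElem h0] at h
        simpa using h
      obtain ⟨m, hm⟩ : ∃ m, word.toList.length = m + 1 :=
        ⟨word.toList.length - 1, by omega⟩
      have hstep : is_hyphen_between word = pvLoopA word.toList 1 m := by
        unfold is_hyphen_between
        rw [hm, pvLoopA, dif_pos h0, if_neg (by simp [hc0, hc]),
          if_neg (by rw [hc0]; exact hc)]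
      have hA := loopA_iff m word.toList 1 (by omega) (le_refl 1)
      have hB := alt_iff word
      rw [hstep]
      rcases hb : is_hyphen_between_alt word with _ | _
      · rcases ha : pvLoopA word.toList 1 m with _ | _
        · rfl
        · exfalso
          obtain ⟨j, _, ht⟩ := hA.mp ha
          have : is_hyphen_between_alt word = true := hB.mpr ⟨j, ht⟩
          rw [hb] at this; cases this
      · obtain ⟨j, ht⟩ := hB.mp hb
        exact hA.mpr ⟨j, ht.1, ht⟩

theorem is_hyphen_between_changed : Claim_changed_is_hyphen_between := by
  unfold Claim_changed_is_hyphen_between; decide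

theorem is_hyphen_between_tight : Claim_exact_is_hyphen_between := by
  intro word _ hD
  obtain ⟨hh, hex⟩ := hD
  rw [A_false_of_head_hyphen word hh,
    (alt_iff word).mpr ((D_trip_iff word).mp hex)]
  decide
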